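-- pv_equiv track=rewrite | github.com/AKPowell-dev/VantageCOM | update_xlam.py | _parse_reg_script
-- ===== SOURCE A (Python) =====
-- from typing import Any, Dict, Iterable, List, Optional, Sequence, Tuple
--
-- def _parse_reg_script(script: str) -> List[Tuple[str, List[str]]]:
--     entries: List[Tuple[str, List[str]]] = []
--     current_key: Optional[str] = None
--     current_values: List[str] = []
--     for raw_line in script.splitlines():
--         line = raw_line.strip()
--         if not line or line.startswith(";") or line.upper().startswith("REGEDIT"):
--             continue
--         if line.startswith("[") and line.endswith("]"):
--             if current_key is not None:
--                 entries.append((current_key, current_values))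
--             current_key = line[1:-1]
--             current_values = []
--         else:
--             current_values.append(line)
--     if current_key is not None:
--         entries.append((current_key, current_values))
--     return entries
-- ===== SOURCE B (Python) =====
-- def _parse_reg_script(script):
--     # Stage 1: normalize and filter once
--     kept = [l for l in (r.strip() for r in script.splitlines())
--             if l and not l.startswith(";") and not l.upper().startswith("REGEDIT")]
--     # Stage 2: build the result BACK-TO-FRONT over the filtered lines: walking in
--     # reverse, value lines accumulate in `pending` until their header is met, so no
--     # flush is needed and values before the first header are dropped automatically.
--     entries = []
--     pending = []
--     for line in reversed(kept):
--         if line.startswith("[") and line.endswith("]"):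
--             entries.append((line[1:-1], pending))
--             pending = []
--         else:
--             pending = [line] + pending
--     entries.reverse()
--     return entries
-- ===== Notes on version B (the rewrite author's own statement) =====
-- stated objective: alternative
-- what changed: B replaces A's stateful forward scan with a flush (current_key/current_values) by two stages: a comprehension that strips and filters the lines once, then a reverse traversal that accumulates pending values until their header appears and builds the entry list back-to-front, so no trailing flush and no Optional key state exist.
import Mathlib
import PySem

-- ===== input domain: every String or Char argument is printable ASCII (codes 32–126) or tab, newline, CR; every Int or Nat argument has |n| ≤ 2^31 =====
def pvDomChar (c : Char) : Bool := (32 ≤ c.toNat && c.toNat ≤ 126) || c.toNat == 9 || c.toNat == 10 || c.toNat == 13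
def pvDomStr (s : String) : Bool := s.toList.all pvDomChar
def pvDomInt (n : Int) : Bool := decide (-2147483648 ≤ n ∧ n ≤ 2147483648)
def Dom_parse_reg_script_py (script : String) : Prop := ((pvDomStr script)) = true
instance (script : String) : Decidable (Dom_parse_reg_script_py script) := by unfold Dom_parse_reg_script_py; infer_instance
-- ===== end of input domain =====

-- B is an alternative decomposition: it first filters/strips the lines, then builds the
-- result back-to-front over the filtered lines, so A's current_key/current_values state
-- and its post-loop flush disappear.

-- ===== PORT A =====
-- one loop iteration of A: state = (entries, current_key, current_values)
def pvStepA (st : List (String × List String) × Option String × List String) (raw : String) :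
    List (String × List String) × Option String × List String :=
  let line := PySem.Str.strip raw
  if line == "" || PySem.Str.startswith line ";" || PySem.Str.startswith (PySem.Str.upper line) "REGEDIT" then
    st
  else if PySem.Str.startswith line "[" && PySem.Str.endswith line "]" then
    let entries' := match st.2.1 with
      | none => st.1
      | some k => st.1 ++ [(k, st.2.2)]
    (entries', some (PySem.Str.slice line (some 1) (some (-1))), [])
  else
    (st.1, st.2.1, st.2.2 ++ [line])

def parse_reg_script_py (script : String) : List (String × List String) :=
  let st := (PySem.Str.splitlines script).foldl pvStepA ([], none, [])
  match st.2.1 with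
  | none => st.1
  | some k => st.1 ++ [(k, st.2.2)]

-- ===== PORT B =====
-- the comprehension's filter: non-blank, no ';' comment, no REGEDIT banner
def pvKeep (l : String) : Bool :=
  !(l == "" || PySem.Str.startswith l ";" || PySem.Str.startswith (PySem.Str.upper l) "REGEDIT")

-- one step of B's reverse loop: state = (entries-in-reverse-order, pending values)
def pvStepB (st : List (String × List String) × List String) (line : String) :
    List (String × List String) × List String :=
  if PySem.Str.startswith line "[" && PySem.Str.endswith line "]" then
    (st.1 ++ [(PySem.Str.slice line (some 1) (some (-1)), st.2)], [])
  else
    (st.1, line :: st.2)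

def parse_reg_script_py_alt (script : String) : List (String × List String) :=
  let kept := ((PySem.Str.splitlines script).map PySem.Str.strip).filter pvKeep
  let st := kept.reverse.foldl pvStepB ([], [])
  st.1.reverse

-- ===== PRECONDITION & SPEC =====
def Spec_parse_reg_script_py (script : String) (out : List (String × List String)) : Prop := out = parse_reg_script_py_alt script
instance (script : String) (out : List (String × List String)) : Decidable (Spec_parse_reg_script_py script out) := by unfold Spec_parse_reg_script_py; infer_instance

-- ===== CLAIM (what is proved, stated in full; the proofs are below) =====
def Claim_equal_parse_reg_script_py : Prop := ∀ (script : String), Dom_parse_reg_script_py script → Spec_parse_reg_script_py script (parse_reg_script_py script)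



-- ===== LEMMAS AND PROOFS =====

-- proof-side predicates and group characterization
def pvHdr (l : String) : Bool := PySem.Str.startswith l "[" && PySem.Str.endswith l "]"

def pvNH (l : String) : Bool := !(pvHdr l)

def pvKey (l : String) : String := PySem.Str.slice l (some 1) (some (-1))

def pvGroups : List String → List (String × List String)
  | [] => []
  | l :: ls =>
    if pvNH l then pvGroups ls
    else (pvKey l, ls.takeWhile pvNH) :: pvGroups (ls.dropWhile pvNH)
termination_by ls => ls.length
decreasing_by
  · simp
  · have := List.length_dropWhile_le pvNH ls; simpa using Nat.lt_succ_of_le this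

lemma pvGroups_skip (l : String) (ls : List String) (h : pvHdr l = false) :
    pvGroups (l :: ls) = pvGroups ls := by
  rw [pvGroups]
  rw [if_pos (show pvNH l = true by rw [pvNH, h]; rfl)]

lemma pvGroups_hdr (l : String) (ls : List String) (h : pvHdr l = true) :
    pvGroups (l :: ls) = (pvKey l, ls.takeWhile pvNH) :: pvGroups (ls.dropWhile pvNH) := by
  rw [pvGroups]
  rw [if_neg (show ¬ pvNH l = true by rw [pvNH, h]; exact fun hc => nomatch hc)]

-- groups of a list are unchanged by dropping its leading non-header lines
lemma pvGroups_dropWhile (ls : List String) :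
    pvGroups (ls.dropWhile pvNH) = pvGroups ls := by
  induction ls with
  | nil => rfl
  | cons l ls ih =>
    cases h : pvHdr l with
    | false =>
      have hnh : pvNH l = true := by rw [pvNH, h]; rfl
      rw [List.dropWhile_cons, if_pos hnh, ih, pvGroups_skip l ls h]
    | true =>
      rw [List.dropWhile_cons,
        if_neg (show ¬ pvNH l = true by rw [pvNH, h]; exact fun hc => nomatch hc)]

-- A's loop skips filtered lines: fold over raw lines = fold over the filtered strips
def pvStepA' (st : List (String × List String) × Option String × List String) (line : String) :
    List (String × List String) × Option String × List String :=
  if pvHdr line then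
    (match st.2.1 with
      | none => st.1
      | some k => st.1 ++ [(k, st.2.2)],
     some (pvKey line), [])
  else
    (st.1, st.2.1, st.2.2 ++ [line])

lemma stepA_eq_stepA' (st : List (String × List String) × Option String × List String)
    (raw : String) (hk : pvKeep (PySem.Str.strip raw) = true) :
    pvStepA st raw = pvStepA' st (PySem.Str.strip raw) := by
  have hcond : (PySem.Str.strip raw == "" || PySem.Str.startswith (PySem.Str.strip raw) ";"
      || PySem.Str.startswith (PySem.Str.upper (PySem.Str.strip raw)) "REGEDIT") = false := by
    cases hc : (PySem.Str.strip raw == "" || PySem.Str.startswith (PySem.Str.strip raw) ";"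
        || PySem.Str.startswith (PySem.Str.upper (PySem.Str.strip raw)) "REGEDIT") with
    | false => rfl
    | true => rw [pvKeep, hc] at hk; exact nomatch hk
  simp only [pvStepA, pvStepA', pvHdr, pvKey, hcond]
  rfl

lemma stepA_skip (st : List (String × List String) × Option String × List String)
    (raw : String) (hk : pvKeep (PySem.Str.strip raw) = false) :
    pvStepA st raw = st := by
  have hcond : (PySem.Str.strip raw == "" || PySem.Str.startswith (PySem.Str.strip raw) ";"
      || PySem.Str.startswith (PySem.Str.upper (PySem.Str.strip raw)) "REGEDIT") = true := by
    cases hc : (PySem.Str.strip raw == "" || PySem.Str.startswith (PySem.Str.strip raw) ";"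
        || PySem.Str.startswith (PySem.Str.upper (PySem.Str.strip raw)) "REGEDIT") with
    | true => rfl
    | false => rw [pvKeep, hc] at hk; exact nomatch hk
  simp only [pvStepA, hcond]
  rfl

lemma foldA_filter (lines : List String) :
    ∀ st, lines.foldl pvStepA st = ((lines.map PySem.Str.strip).filter pvKeep).foldl pvStepA' st := by
  induction lines with
  | nil => intro st; rfl
  | cons raw rest ih =>
    intro st
    cases hk : pvKeep (PySem.Str.strip raw) with
    | true =>
      simp only [List.foldl_cons, List.map_cons, List.filter_cons, hk, if_true]
      rw [stepA_eq_stepA' st raw hk]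
      exact ih _
    | false =>
      simp only [List.foldl_cons, List.map_cons, List.filter_cons, hk]
      rw [stepA_skip st raw hk]
      exact ih _

def pvFlush (st : List (String × List String) × Option String × List String) :
    List (String × List String) :=
  match st.2.1 with
  | none => st.1
  | some k => st.1 ++ [(k, st.2.2)]

-- A's fold over the kept lines computes the groups (values before the first header are dropped)
lemma foldA_groups (ls : List String) :
    (∀ es vs, pvFlush (ls.foldl pvStepA' (es, none, vs)) = es ++ pvGroups ls) ∧
    (∀ es k vs, pvFlush (ls.foldl pvStepA' (es, some k, vs)) =
        es ++ (k, vs ++ ls.takeWhile pvNH) :: pvGroups (ls.dropWhile pvNH)) := by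
  induction ls with
  | nil =>
    exact ⟨fun es vs => by simp [pvFlush, pvGroups], fun es k vs => by simp [pvFlush, pvGroups]⟩
  | cons l ls ih =>
    cases h : pvHdr l with
    | false =>
      have hnh : pvNH l = true := by rw [pvNH, h]; rfl
      constructor
      · intro es vs
        simp only [List.foldl_cons]
        rw [show pvStepA' (es, none, vs) l = (es, none, vs ++ [l]) by
          simp only [pvStepA', h]; rfl]
        rw [ih.1 es (vs ++ [l]), pvGroups_skip l ls h]
      · intro es k vs
        simp only [List.foldl_cons]
        rw [show pvStepA' (es, some k, vs) l = (es, some k, vs ++ [l]) by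
          simp only [pvStepA', h]; rfl]
        rw [ih.2 es k (vs ++ [l])]
        rw [List.takeWhile_cons, List.dropWhile_cons, if_pos hnh, if_pos hnh]
        simp
    | true =>
      constructor
      · intro es vs
        simp only [List.foldl_cons]
        rw [show pvStepA' (es, none, vs) l = (es, some (pvKey l), []) by
          simp only [pvStepA', h]; rfl]
        rw [ih.2 es (pvKey l) []]
        rw [pvGroups_hdr l ls h]
        simp
      · intro es k vs
        simp only [List.foldl_cons]
        rw [show pvStepA' (es, some k, vs) l = (es ++ [(k, vs)], some (pvKey l), []) by
          simp only [pvStepA', h]; rfl]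
        rw [ih.2 (es ++ [(k, vs)]) (pvKey l) []]
        rw [List.takeWhile_cons, List.dropWhile_cons,
          if_neg (show ¬ pvNH l = true by rw [pvNH, h]; exact fun hc => nomatch hc),
          if_neg (show ¬ pvNH l = true by rw [pvNH, h]; exact fun hc => nomatch hc)]
        rw [pvGroups_hdr l ls h]
        simp

-- B's reverse fold computes the groups (reversed) together with the leading values
lemma foldB_groups (ls : List String) :
    ls.foldr (fun l st => pvStepB st l) ([], []) =
      ((pvGroups ls).reverse, ls.takeWhile pvNH) := by
  induction ls with
  | nil => simp [pvGroups]
  | cons l ls ih =>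
    cases h : pvHdr l with
    | false =>
      have hnh : pvNH l = true := by rw [pvNH, h]; rfl
      simp only [List.foldr_cons, ih]
      rw [pvGroups_skip l ls h]
      rw [List.takeWhile_cons, if_pos hnh]
      simp only [pvStepB]
      rw [if_neg (show ¬ (PySem.Str.startswith l "[" && PySem.Str.endswith l "]") = true from
        fun hc => by rw [pvHdr] at h; rw [hc] at h; exact nomatch h)]
    | true =>
      simp only [List.foldr_cons, ih]
      rw [List.takeWhile_cons,
        if_neg (show ¬ pvNH l = true by rw [pvNH, h]; exact fun hc => nomatch hc)]
      simp only [pvStepB]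
      rw [if_pos (show (PySem.Str.startswith l "[" && PySem.Str.endswith l "]") = true from by
        rw [pvHdr] at h; exact h)]
      rw [pvGroups_hdr l ls h, pvGroups_dropWhile]
      simp [pvKey]

-- ===== VERDICT (by name: the statement is the Claim_ definition above) =====
theorem parse_reg_script_py_spec : Claim_equal_parse_reg_script_py := by
  intro script _
  unfold Spec_parse_reg_script_py parse_reg_script_py parse_reg_script_py_alt
  rw [foldA_filter]
  simp only [List.foldl_reverse, foldB_groups, List.reverse_reverse]
  have h := (foldA_groups (((PySem.Str.splitlines script).map PySem.Str.strip).filter pvKeep)).1 [] []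
  rw [List.nil_append, pvFlush] at h
  exact h
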